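-- pv_equiv track=rewrite | github.com/manson112/codes | etc/secret_map.py | solution
-- ===== SOURCE A (Python) =====
-- def solution(n, arr1, arr2):
--     answer = []
--     for i in range(n):
--         num = arr1[i] | arr2[i]
--         s = ""
--         for j in range(n):
--             s += "#" if num & (2**(n-1) >> j) else " "
--         answer += [s]
--     return answer
-- ===== SOURCE B (Python) =====
-- def solution(n, arr1, arr2):
--     table = str.maketrans("10", "# ")
--     return [format((arr1[i] | arr2[i]) & ((1 << n) - 1), "0{}b".format(n)).translate(table)
--             for i in range(n)]
-- ===== Notes on version B (the rewrite author's own statement) =====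
-- stated objective: idiomatic
-- what changed: The inner per-bit loop (recomputing 2**(n-1)>>j and AND-testing each bit of the OR) is replaced by masking the OR to n bits once, rendering it with format(..., '0nb'), and translating '1'->'#', '0'->' '.
import Mathlib
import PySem

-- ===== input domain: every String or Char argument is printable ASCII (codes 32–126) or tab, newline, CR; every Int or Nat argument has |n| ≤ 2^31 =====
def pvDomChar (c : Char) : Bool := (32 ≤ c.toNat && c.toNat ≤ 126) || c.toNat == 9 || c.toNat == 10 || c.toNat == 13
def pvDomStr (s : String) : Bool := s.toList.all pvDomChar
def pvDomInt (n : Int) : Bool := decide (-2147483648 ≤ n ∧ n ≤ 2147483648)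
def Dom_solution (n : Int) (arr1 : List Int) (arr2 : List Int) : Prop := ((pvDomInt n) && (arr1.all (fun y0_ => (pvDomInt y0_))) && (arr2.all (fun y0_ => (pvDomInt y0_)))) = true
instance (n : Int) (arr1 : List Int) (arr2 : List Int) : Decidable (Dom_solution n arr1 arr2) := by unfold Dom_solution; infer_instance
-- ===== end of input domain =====

-- B replaces A's inner per-bit masking loop (which re-derives 2**(n-1)>>j for every bit) by one
-- mask-to-n-bits + zero-padded binary rendering + '1'->'#','0'->' ' translation per row (idiomatic).


-- ===== PORT A =====
-- strings are represented as List Char while being built (Lean's String.append is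
-- kernel-opaque); the finished row is packed with String.mk
def solution (n : Int) (arr1 : List Int) (arr2 : List Int) : List String :=
  (PySem.List.pyRange 0 n 1).foldl (fun answer i =>
    let num := PySem.Int.bor (PySem.List.pyGetD arr1 i 0) (PySem.List.pyGetD arr2 i 0)
    let s := (PySem.List.pyRange 0 n 1).foldl (fun s j =>
      s ++ (if PySem.Int.band num (((2 : Int) ^ (n - 1).toNat) >>> j.toNat) ≠ 0 then ['#'] else [' '])) ([] : List Char)
    answer ++ [String.mk s]) []

-- ===== PORT B =====
-- format(m, 'b') for m ≥ 0: binary digits, MSB first ("0" for 0)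
def natBin (m : Nat) : List Char :=
  if h : m < 2 then [if m = 1 then '1' else '0']
  else natBin (m / 2) ++ [if m % 2 = 1 then '1' else '0']
  decreasing_by exact Nat.div_lt_self (by omega) (by omega)

-- format(m, '0{w}b') for m ≥ 0: zero-pad on the left to width w
def padBin (w : Nat) (m : Nat) : List Char :=
  List.replicate (w - (natBin m).length) '0' ++ natBin m

-- str.translate(str.maketrans("10", "# "))
def trCh (c : Char) : Char := if c = '1' then '#' else if c = '0' then ' ' else c

def solution_alt (n : Int) (arr1 : List Int) (arr2 : List Int) : List String :=
  (PySem.List.pyRange 0 n 1).map (fun i =>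
    let num := PySem.Int.bor (PySem.List.pyGetD arr1 i 0) (PySem.List.pyGetD arr2 i 0)
    let m := (PySem.Int.band num (((1 : Int) <<< n.toNat) - 1)).toNat
    String.mk ((padBin n.toNat m).map trCh))

-- ===== PRECONDITION & SPEC =====
-- A raises IndexError when n exceeds either list's length; Pre_ excludes exactly those inputs.
def Pre_solution (n : Int) (arr1 : List Int) (arr2 : List Int) : Prop :=
  n ≤ (arr1.length : Int) ∧ n ≤ (arr2.length : Int)
instance (n : Int) (arr1 : List Int) (arr2 : List Int) : Decidable (Pre_solution n arr1 arr2) := by unfold Pre_solution; infer_instance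

def pvWitness_solution : Int × List Int × List Int := (3, [9, 20, 28], [30, 1, 3])

def Spec_solution (n : Int) (arr1 : List Int) (arr2 : List Int) (out : List String) : Prop := out = solution_alt n arr1 arr2
instance (n : Int) (arr1 : List Int) (arr2 : List Int) (out : List String) : Decidable (Spec_solution n arr1 arr2 out) := by unfold Spec_solution; infer_instance

-- ===== CLAIM (what is proved, stated in full; the proofs are below) =====
def Claim_equal_solution : Prop := ∀ (n : Int) (arr1 : List Int) (arr2 : List Int), Dom_solution n arr1 arr2 → Pre_solution n arr1 arr2 → Spec_solution n arr1 arr2 (solution n arr1 arr2)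

-- ===== LEMMAS AND PROOFS =====

lemma int_two_pow_cast (j : Nat) : ((2 : Int) ^ j) = (((2 ^ j : Nat) : Int)) := by push_cast; ring

lemma int_mask_cast (w : Nat) : ((2 : Int) ^ w - 1) = (((2 ^ w - 1 : Nat) : Int)) := by
  have : (1 : Nat) ≤ 2 ^ w := Nat.one_le_two_pow
  push_cast [this]; ring

-- masked value is < 2^w
lemma mask_lt (num : Int) (w : Nat) :
    (PySem.Int.band num ((2 : Int) ^ w - 1)).toNat < 2 ^ w := by
  have h1w : (1 : Nat) ≤ 2 ^ w := Nat.one_le_two_pow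
  rw [int_mask_cast]
  by_cases h : 0 ≤ num
  · rw [PySem.Int.band_of_nonneg h (by exact_mod_cast Nat.zero_le _)]
    simp only [Int.toNat_natCast, Nat.and_two_pow_sub_one_eq_mod]
    exact Nat.mod_lt _ (Nat.two_pow_pos w)
  · simp only [PySem.Int.band, h, if_false,
      if_pos (show (0 : Int) ≤ (((2 ^ w - 1 : Nat) : Int)) from by exact_mod_cast Nat.zero_le _)]
    simp only [Int.toNat_natCast]
    have hle : (2 ^ w - 1) - ((2 ^ w - 1) &&& (-num - 1).toNat) ≤ 2 ^ w - 1 := Nat.sub_le _ _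
    omega

-- the bit test A performs equals a testBit of B's masked value
lemma band_two_pow_ne_zero_iff (num : Int) (w k : Nat) (hk : k < w) :
    (PySem.Int.band num ((2 : Int) ^ k) ≠ 0) ↔
      ((PySem.Int.band num ((2 : Int) ^ w - 1)).toNat).testBit k = true := by
  have hkpos : 0 < 2 ^ k := Nat.two_pow_pos k
  have h1w : (1 : Nat) ≤ 2 ^ w := Nat.one_le_two_pow
  rw [int_two_pow_cast k, int_mask_cast w]
  by_cases h : 0 ≤ num
  · rw [PySem.Int.band_of_nonneg h (by exact_mod_cast Nat.zero_le _),
        PySem.Int.band_of_nonneg h (by exact_mod_cast Nat.zero_le _)]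
    simp only [Int.toNat_natCast, Nat.and_two_pow_sub_one_eq_mod, Nat.and_two_pow,
      Nat.testBit_mod_two_pow]
    cases hbit : num.toNat.testBit k
    · simp
    · simp [hk]
  · -- negative num: band num b = b - (b &&& (-num-1)) on the Nat side
    simp only [PySem.Int.band, h, if_false,
      if_pos (show (0 : Int) ≤ (((2 ^ k : Nat) : Int)) from by exact_mod_cast Nat.zero_le _),
      if_pos (show (0 : Int) ≤ (((2 ^ w - 1 : Nat) : Int)) from by exact_mod_cast Nat.zero_le _)]
    set u : Nat := (-num - 1).toNat with hu
    simp only [Int.toNat_natCast]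
    have hland : 2 ^ k &&& u = (u.testBit k).toNat * 2 ^ k := by
      rw [Nat.land_comm]; exact Nat.and_two_pow u k
    have hlandw : (2 ^ w - 1) &&& u = u % 2 ^ w := by
      rw [Nat.land_comm]; exact Nat.and_two_pow_sub_one_eq_mod u w
    rw [hland, hlandw]
    have humod : u % 2 ^ w < 2 ^ w := Nat.mod_lt _ (Nat.two_pow_pos w)
    have hsub : (2 ^ w - 1) - u % 2 ^ w = 2 ^ w - (u % 2 ^ w + 1) := by omega
    rw [hsub, Nat.testBit_two_pow_sub_succ humod k, Nat.testBit_mod_two_pow]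
    cases hbit : u.testBit k
    · simp only [Bool.toNat_false, Nat.zero_mul, Nat.sub_zero]
      simp [hk]
    · simp [hk]

-- padBin peels its last (least significant) digit
lemma padBin_succ (w : Nat) (hw : 1 ≤ w) (m : Nat) :
    padBin (w + 1) m = padBin w (m / 2) ++ [if m % 2 = 1 then '1' else '0'] := by
  by_cases h2 : m < 2
  · have hm2 : m / 2 = 0 := by omega
    have hb0 : natBin 0 = ['0'] := by unfold natBin; simp
    have hbm : natBin m = [if m = 1 then '1' else '0'] := by unfold natBin; simp [h2]
    have hch : (if m = 1 then '1' else '0') = (if m % 2 = 1 then '1' else '0') := by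
      interval_cases m <;> rfl
    rw [hm2]
    unfold padBin
    rw [hb0, hbm, hch]
    simp only [List.length_singleton]
    have hrep : List.replicate (w - 1) '0' ++ ['0'] = List.replicate w '0' := by
      have hww : w = (w - 1) + 1 := by omega
      rw [hww, List.replicate_succ']
      simp
    rw [hrep, Nat.add_sub_cancel]
  · have hrec : natBin m = natBin (m / 2) ++ [if m % 2 = 1 then '1' else '0'] := by
      conv_lhs => unfold natBin
      simp [h2]
    unfold padBin
    rw [hrec]
    simp only [List.length_append, List.length_singleton]
    rw [List.append_assoc]
    congr 2
    omega

-- the zero-padded binary rendering, characterised positionally (MSB first)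
lemma padBin_eq_map (w : Nat) (hw : 1 ≤ w) (m : Nat) (hm : m < 2 ^ w) :
    padBin w m = (List.range w).map (fun j => if m.testBit (w - 1 - j) then '1' else '0') := by
  induction w generalizing m with
  | zero => omega
  | succ w ih =>
    by_cases hw1 : 1 ≤ w
    · have hm2 : m / 2 < 2 ^ w := by
        have hp : 2 ^ (w + 1) = 2 ^ w * 2 := by ring
        omega
      rw [padBin_succ w hw1 m, ih hw1 (m / 2) hm2, List.range_succ, List.map_append]
      congr 1
      · apply List.map_congr_left
        intro j hj
        have hj' : j < w := List.mem_range.mp hj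
        have he : w + 1 - 1 - j = (w - 1 - j) + 1 := by omega
        rw [he, ← Nat.testBit_div_two]
      · simp [Nat.testBit_zero]
    · have hw0 : w = 0 := by omega
      subst hw0
      have hm1 : m < 2 := by simpa using hm
      unfold padBin natBin
      simp [hm1]
      interval_cases m <;> simp

-- 'for j in range(..): s += (one char)' is a map
lemma foldl_append_ite_singleton {α : Type} (P : α → Prop) [DecidablePred P] (c d : Char)
    (l : List α) (acc : List Char) :
    l.foldl (fun s j => s ++ (if P j then [c] else [d])) acc
      = acc ++ l.map (fun j => if P j then c else d) := by
  induction l generalizing acc with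
  | nil => simp
  | cons x t ih =>
    simp only [List.foldl_cons, List.map_cons, ih]
    split <;> simp

-- one row of A equals one row of B
lemma row_eq (w : Nat) (hw : 1 ≤ w) (num : Int) :
    (PySem.List.pyRange 0 ((w : Nat) : Int) 1).foldl (fun s j =>
        s ++ (if PySem.Int.band num (((2 : Int) ^ (((w : Nat) : Int) - 1).toNat) >>> j.toNat) ≠ 0 then ['#'] else [' '])) ([] : List Char)
      = (padBin ((w : Nat) : Int).toNat ((PySem.Int.band num (((1 : Int) <<< ((w : Nat) : Int).toNat) - 1)).toNat)).map trCh := by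
  have htn : (((w : Nat) : Int)).toNat = w := Int.toNat_natCast w
  have htn1 : ((((w : Nat) : Int)) - 1).toNat = w - 1 := by omega
  have hshl : ((1 : Int) <<< w) - 1 = (2 : Int) ^ w - 1 := by
    rw [Int.shiftLeft_eq]; ring
  rw [htn, htn1, hshl]
  set M : Nat := (PySem.Int.band num ((2 : Int) ^ w - 1)).toNat with hM
  have hMlt : M < 2 ^ w := mask_lt num w
  rw [foldl_append_ite_singleton
        (fun j : Int => PySem.Int.band num (((2 : Int) ^ (w - 1)) >>> ((j.toNat : Int))) ≠ 0) '#' ' ',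
      List.nil_append, PySem.List.pyRange_zero_natCast, List.map_map,
      padBin_eq_map w hw M hMlt, List.map_map]
  apply List.map_congr_left
  intro k hk
  have hkw : k < w := List.mem_range.mp hk
  simp only [Function.comp]
  have hjt : (((k : Nat) : Int)).toNat = k := Int.toNat_natCast k
  rw [hjt]
  have hsh : ((2 : Int) ^ (w - 1)) >>> (k : Int) = (2 : Int) ^ (w - 1 - k) := by
    rw [Int.shiftRight_natCast_right, Int.shiftRight_eq_div_pow]
    have hsplit : (2 : Int) ^ (w - 1) = (2 : Int) ^ (w - 1 - k) * (2 : Int) ^ k := by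
      rw [← pow_add]; congr 1; omega
    rw [hsplit]
    push_cast
    exact Int.mul_ediv_cancel _ (by positivity)
  rw [hsh]
  have hbit := band_two_pow_ne_zero_iff num w (w - 1 - k) (by omega)
  rw [← hM] at hbit
  by_cases hb : PySem.Int.band num ((2 : Int) ^ (w - 1 - k)) ≠ 0
  · rw [if_pos hb, hbit.mp hb]
    rfl
  · rw [if_neg hb]
    have hfalse : M.testBit (w - 1 - k) = false := by
      cases hx : M.testBit (w - 1 - k)
      · rfl
      · exact absurd (hbit.mpr hx) hb
    rw [hfalse]
    rfl

-- ===== VERDICT (by name: the statement is the Claim_ definition above) =====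
theorem solution_spec : Claim_equal_solution := by
  intro n arr1 arr2 _hdom _hpre
  unfold Spec_solution
  simp only [solution, solution_alt]
  rw [PySem.List.foldl_append_singleton_eq_map, List.nil_append]
  apply List.map_congr_left
  intro i hi
  have hmem := (PySem.List.mem_pyRange_one).mp hi
  have hw : n = ((n.toNat : Nat) : Int) := by omega
  have hw1 : 1 ≤ n.toNat := by omega
  rw [hw]
  exact congrArg String.mk (row_eq n.toNat hw1 _)
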